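-- pv_equiv track=rewrite | github.com/anniebryan/advent-of-code-19 | aoc_2024/day_3/solution.py | get_enabled_indices
-- ===== SOURCE A (Python) =====
-- def get_enabled_indices(mem: str) -> set[int]:
--     enabled_indices = set()
--     is_enabled = True
--     for i in range(len(mem)):
--         if mem[i:].startswith("do()"):
--             is_enabled = True
--         elif mem[i:].startswith("don't()"):
--             is_enabled = False
--
--         if is_enabled:
--             enabled_indices.add(i)
--     return enabled_indices
-- ===== SOURCE B (Python) =====
-- def get_enabled_indices(mem: str) -> set[int]:
--     result = set()
--     enabled = True
--     cursor = 0   # start of the current constant-state segment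
--     scan = 0     # next position to search markers from
--     while True:
--         d = mem.find("do()", scan)
--         t = mem.find("don't()", scan)
--         if d == -1 and t == -1:
--             break
--         if t == -1 or (d != -1 and d < t):
--             pos, state = d, True
--         else:
--             pos, state = t, False
--         if enabled:
--             result.update(range(cursor, pos))
--         enabled = state
--         cursor = pos
--         scan = pos + 1
--     if enabled:
--         result.update(range(cursor, len(mem)))
--     return result
-- ===== Notes on version B (the rewrite author's own statement) =====
-- stated objective: faster
-- what changed: Instead of slicing the string at every index and testing both markers there, B locates the marker positions with str.find, walks from marker to marker, and adds each enabled interval to the set wholesale.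
import Mathlib
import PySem

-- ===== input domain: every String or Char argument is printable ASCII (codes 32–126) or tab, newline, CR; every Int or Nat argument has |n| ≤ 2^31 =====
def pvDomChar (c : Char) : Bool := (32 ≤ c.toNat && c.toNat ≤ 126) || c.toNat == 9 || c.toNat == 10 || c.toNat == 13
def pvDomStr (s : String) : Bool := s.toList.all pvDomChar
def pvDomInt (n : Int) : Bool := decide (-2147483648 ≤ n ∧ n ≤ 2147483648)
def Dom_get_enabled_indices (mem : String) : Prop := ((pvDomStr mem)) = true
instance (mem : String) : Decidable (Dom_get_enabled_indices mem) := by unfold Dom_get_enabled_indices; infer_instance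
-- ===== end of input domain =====

-- B replaces A's per-index slice-and-test scan by a marker-event walk: str.find jumps from
-- marker to marker and whole enabled intervals are added at once (objective: faster).

-- ===== PORT A =====
def get_enabled_indices (mem : String) : List Int :=
  ((PySem.List.pyRange 0 (PySem.Str.len mem) 1).foldl
    (fun (st : PySem.Set Int × Bool) (i : Int) =>
      let is_enabled : Bool :=
        if PySem.Str.startswith (PySem.Str.slice mem (some i) none) "do()" then true
        else if PySem.Str.startswith (PySem.Str.slice mem (some i) none) "don't()" then false
        else st.2
      ((if is_enabled then PySem.Set.add st.1 i else st.1), is_enabled))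
    ((PySem.Set.empty : PySem.Set Int), true)).1

-- ===== PORT B =====
-- the 'while True' loop of Source B; fuel is only a totality guard (length+1 always suffices)
def bLoop (mem : String) (fuel : Nat) (scan cursor : Int) (enabled : Bool)
    (res : PySem.Set Int) : PySem.Set Int × Bool × Int :=
  match fuel with
  | 0 => (res, enabled, cursor)
  | fuel + 1 =>
    let d := PySem.Str.findFrom mem "do()" scan
    let t := PySem.Str.findFrom mem "don't()" scan
    if d = -1 ∧ t = -1 then (res, enabled, cursor)
    else
      let pe : Int × Bool := if t = -1 ∨ (¬d = -1 ∧ d < t) then (d, true) else (t, false)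
      let res' := if enabled then PySem.Set.update res (PySem.List.pyRange cursor pe.1 1) else res
      bLoop mem fuel (pe.1 + 1) pe.1 pe.2 res'

def get_enabled_indices_alt (mem : String) : List Int :=
  let r := bLoop mem (mem.toList.length + 1) 0 0 true PySem.Set.empty
  if r.2.1 then PySem.Set.update r.1 (PySem.List.pyRange r.2.2 (PySem.Str.len mem) 1) else r.1

-- ===== PRECONDITION & SPEC =====
def Spec_get_enabled_indices (mem : String) (out : List Int) : Prop := out = get_enabled_indices_alt mem
instance (mem : String) (out : List Int) : Decidable (Spec_get_enabled_indices mem out) := by unfold Spec_get_enabled_indices; infer_instance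

-- ===== CLAIM (what is proved, stated in full; the proofs are below) =====
def Claim_equal_get_enabled_indices : Prop := ∀ (mem : String), Dom_get_enabled_indices mem → Spec_get_enabled_indices mem (get_enabled_indices mem)

-- ===== LEMMAS AND PROOFS =====

-- the marker starting at index i, if any ('do()' → enable, "don't()" → disable)
def markerAt (s : List Char) (i : Nat) : Option Bool :=
  if PySem.Chars.startswith (s.drop i) "do()".toList then some true
  else if PySem.Chars.startswith (s.drop i) "don't()".toList then some false
  else none

-- the enabled-state after A has processed indices 0..c-1
def stP (s : List Char) (c : Nat) : Bool :=
  (List.range c).foldl (fun b i => (markerAt s i).getD b) true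

-- the enabled indices in [a, b), as A returns them (increasing)
def gseg (s : List Char) (a b : Nat) : List Int :=
  List.map (fun j => ((j : Nat) : Int)) ((List.range' a (b - a)).filter (fun j => stP s (j+1)))

lemma stP_succ (s : List Char) (c : Nat) :
    stP s (c+1) = (markerAt s c).getD (stP s c) := by
  simp [stP, List.range_succ]

lemma stP_const (s : List Char) {c j : Nat} (h : c ≤ j)
    (hm : ∀ i, c ≤ i → i < j → markerAt s i = none) : stP s j = stP s c := by
  induction j, h using Nat.le_induction with
  | base => rfl
  | succ j hj ih =>
    rw [stP_succ, hm j hj (by omega), Option.getD_none]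
    exact ih (fun i h1 h2 => hm i h1 (by omega))

lemma not_both_markers (t : List Char) :
    ¬ ("do()".toList <+: t ∧ "don't()".toList <+: t) := by
  rintro ⟨h1, h2⟩
  obtain ⟨u, rfl⟩ := h1
  simp [List.cons_prefix_cons] at h2

lemma marker_do {s : List Char} {i : Nat} (h : "do()".toList <+: s.drop i) :
    markerAt s i = some true := by
  unfold markerAt
  rw [if_pos ((PySem.Chars.startswith_iff _ _).2 h)]

lemma marker_dont {s : List Char} {i : Nat} (h : "don't()".toList <+: s.drop i) :
    markerAt s i = some false := by
  unfold markerAt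
  rw [if_neg (fun hc => not_both_markers _ ⟨(PySem.Chars.startswith_iff _ _).1 hc, h⟩),
      if_pos ((PySem.Chars.startswith_iff _ _).2 h)]

lemma marker_none {s : List Char} {i : Nat}
    (h1 : ¬ ("do()".toList <+: s.drop i)) (h2 : ¬ ("don't()".toList <+: s.drop i)) :
    markerAt s i = none := by
  unfold markerAt
  rw [if_neg (fun hc => h1 ((PySem.Chars.startswith_iff _ _).1 hc)),
      if_neg (fun hc => h2 ((PySem.Chars.startswith_iff _ _).1 hc))]

lemma prefix_drop_infix (s sub : List Char) {k i : Nat} (hk : k ≤ i)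
    (h : sub <+: s.drop i) : sub <:+: s.drop k := by
  have hd : s.drop i = (s.drop k).drop (i - k) := by
    rw [List.drop_drop]; congr 1; omega
  exact h.isInfix.trans (by rw [hd]; exact (List.drop_suffix _ _).isInfix)

lemma prefix_drop_lt {s sub : List Char} {i : Nat} (hne : sub ≠ [])
    (h : sub <+: s.drop i) : i < s.length := by
  by_contra hi
  rw [List.drop_eq_nil_of_le (by omega)] at h
  exact hne (List.prefix_nil.1 h)

lemma gseg_mem_lt {s : List Char} {a b : Nat} {x : Int} (h : x ∈ gseg s a b) :
    (a : Int) ≤ x ∧ x < (b : Int) := by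
  unfold gseg at h
  obtain ⟨j, hj, rfl⟩ := List.mem_map.1 h
  have hj2 := List.mem_of_mem_filter hj
  rw [List.mem_range'_1] at hj2
  exact ⟨by exact_mod_cast hj2.1, by exact_mod_cast (by omega : j < b)⟩

lemma gseg_append (s : List Char) {a b c : Nat} (h1 : a ≤ b) (h2 : b ≤ c) :
    gseg s a c = gseg s a b ++ gseg s b c := by
  have h := List.range'_append (s:=a) (m:=b-a) (n:=c-b) (step:=1)
  rw [show a + 1*(b-a) = b by omega, show (b-a)+(c-b) = c - a by omega] at h
  unfold gseg
  rw [← h, List.filter_append, List.map_append]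

lemma gseg_empty (s : List Char) (m : Nat) : gseg s m m = [] := by
  simp [gseg]

-- a segment with constant state: all of it or nothing
lemma gseg_const (s : List Char) {a b : Nat} (e : Bool) (h : a ≤ b)
    (hc : ∀ j, a ≤ j → j < b → stP s (j+1) = e) :
    gseg s a b = if e then List.map (fun j => ((j : Nat) : Int)) (List.range' a (b - a)) else [] := by
  have hf : (List.range' a (b - a)).filter (fun j => stP s (j+1))
      = if e then List.range' a (b - a) else [] := by
    split_ifs with he
    · apply List.filter_eq_self.2
      intro j hj
      rw [List.mem_range'_1] at hj
      rw [hc j hj.1 (by omega), he]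
    · apply List.filter_eq_nil_iff.2
      intro j hj
      rw [List.mem_range'_1] at hj
      simp [hc j hj.1 (by omega), he]
  rw [gseg, hf]
  split_ifs <;> rfl

lemma pyRange_cast (a b : Nat) :
    PySem.List.pyRange (a : Int) (b : Int) 1 = List.map (fun j => ((j : Nat) : Int)) (List.range' a (b - a)) := by
  apply List.ext_getElem
  · rw [PySem.List.length_pyRange_one, List.length_map, List.length_range']
    omega
  · intro k h1 h2
    rw [PySem.List.getElem_pyRange_one, List.getElem_map, List.getElem_range']
    push_cast
    ring

lemma set_add_notmem {s : PySem.Set Int} {x : Int} (h : x ∉ s) :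
    PySem.Set.add s x = s ++ [x] := by
  simp [PySem.Set.add, PySem.Set.contains, h]

lemma set_update_disjoint (res : PySem.Set Int) (xs : List Int) (hnd : xs.Nodup)
    (h : ∀ x ∈ xs, x ∉ res) : PySem.Set.update res xs = res ++ xs := by
  induction xs generalizing res with
  | nil => simp [PySem.Set.update]
  | cons x xs ih =>
    have hu : PySem.Set.update res (x :: xs) = PySem.Set.update (PySem.Set.add res x) xs := by
      simp [PySem.Set.update]
    rw [hu, set_add_notmem (h x (by simp)), ih _ hnd.of_cons ?_]
    · simp
    · intro y hy
      simp only [List.mem_append, List.mem_singleton]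
      rintro (hr | rfl)
      · exact h y (by simp [hy]) hr
      · exact (List.nodup_cons.1 hnd).1 hy

-- the enabled-update A performs at index m equals the markerAt description
lemma A_body_state (mem : String) (m : Nat) (b : Bool) :
    (if PySem.Str.startswith (PySem.Str.slice mem (some (m : Int)) none) "do()" then true
     else if PySem.Str.startswith (PySem.Str.slice mem (some (m : Int)) none) "don't()" then false
     else b) = (markerAt mem.toList m).getD b := by
  have hs : (PySem.Str.slice mem (some (m : Int)) none).toList = mem.toList.drop m := by
    simp [PySem.Str.slice, PySem.List.slice_from_natCast]
  simp only [PySem.Str.startswith_eq, hs, markerAt]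
  split_ifs <;> rfl

-- A's fold over range m produces exactly (gseg 0 m, stP m)
lemma A_fold (mem : String) (m : Nat) :
    (List.range m).foldl
      (fun (st : PySem.Set Int × Bool) (k : Nat) =>
        let i : Int := 0 + (k : Int)
        let is_enabled : Bool :=
          if PySem.Str.startswith (PySem.Str.slice mem (some i) none) "do()" then true
          else if PySem.Str.startswith (PySem.Str.slice mem (some i) none) "don't()" then false
          else st.2
        ((if is_enabled then PySem.Set.add st.1 i else st.1), is_enabled))
      ((PySem.Set.empty : PySem.Set Int), true)
    = (gseg mem.toList 0 m, stP mem.toList m) := by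
  induction m with
  | zero =>
    simp [gseg_empty, stP, PySem.Set.empty]
  | succ m ih =>
    rw [List.range_succ, List.foldl_append, ih]
    simp only [List.foldl_cons, List.foldl_nil, zero_add]
    rw [A_body_state, ← stP_succ]
    have hnm : (m : Int) ∉ gseg mem.toList 0 m := by
      intro h
      have := (gseg_mem_lt h).2
      omega
    rw [gseg_append mem.toList (Nat.zero_le m) (Nat.le_succ m)]
    rw [show gseg mem.toList m (m+1)
        = if stP mem.toList (m+1) then [(m : Int)] else [] from by
      rw [gseg_const mem.toList (stP mem.toList (m+1)) (Nat.le_succ m)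
            (fun j h1 h2 => by rw [show j = m by omega])]
      split_ifs <;> simp [List.range'_one]]
    cases hst : stP mem.toList (m+1) with
    | false => simp
    | true => simp [set_add_notmem hnm]

lemma A_eq_gseg (mem : String) :
    get_enabled_indices mem = gseg mem.toList 0 mem.toList.length := by
  have h := A_fold mem mem.toList.length
  unfold get_enabled_indices
  rw [PySem.Str.len_eq, PySem.List.pyRange_one,
      show ((mem.toList.length : Int) - 0).toNat = mem.toList.length by omega,
      List.foldl_map]
  exact congrArg Prod.fst h

-- the main invariant of Source B's while-loop, stated through the final tail-fill
lemma bLoop_spec (mem : String) :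
    ∀ (fuel scan cursor : Nat) (enabled : Bool) (res : PySem.Set Int),
    mem.toList.length + 1 ≤ fuel + scan →
    scan ≤ mem.toList.length →
    cursor ≤ scan →
    (∀ x ∈ res, x < (cursor : Int)) →
    enabled = stP mem.toList scan →
    (∀ j, cursor ≤ j → j < scan → stP mem.toList (j+1) = enabled) →
    (let r := bLoop mem fuel (scan : Int) (cursor : Int) enabled res
     if r.2.1 then PySem.Set.update r.1 (PySem.List.pyRange r.2.2 (PySem.Str.len mem) 1) else r.1)
    = res ++ gseg mem.toList cursor mem.toList.length := by
  intro fuel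
  induction fuel with
  | zero =>
    intro scan cursor enabled res hfuel hscan _ _ _ _
    omega
  | succ fuel ih =>
    intro scan cursor enabled res hfuel hscan hcs hres hen hseg
    simp only [bLoop]
    by_cases hbr : PySem.Str.findFrom mem "do()" (scan : Int) = -1 ∧
                   PySem.Str.findFrom mem "don't()" (scan : Int) = -1
    · rw [if_pos hbr]
      simp only []
      have hnomark : ∀ i, scan ≤ i → i < mem.toList.length → markerAt mem.toList i = none := by
        intro i h1 h2
        apply marker_none
        · intro hpre
          have hinf := prefix_drop_infix mem.toList _ h1 hpre
          have hD := (PySem.Chars.findFrom_natCast_eq_neg_one_iff mem.toList "do()".toList scan hscan).1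
            (by rw [← PySem.Str.findFrom_eq]; exact hbr.1)
          exact hD hinf
        · intro hpre
          have hinf := prefix_drop_infix mem.toList _ h1 hpre
          have hT := (PySem.Chars.findFrom_natCast_eq_neg_one_iff mem.toList "don't()".toList scan hscan).1
            (by rw [← PySem.Str.findFrom_eq]; exact hbr.2)
          exact hT hinf
      have hstate : ∀ j, cursor ≤ j → j < mem.toList.length → stP mem.toList (j+1) = enabled := by
        intro j h1 h2
        by_cases hjs : j < scan
        · exact hseg j h1 hjs
        · rw [stP_const mem.toList (c := scan) (by omega)
              (fun i hi1 hi2 => hnomark i hi1 (by omega)), ← hen]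
      rw [gseg_const mem.toList enabled (by omega) hstate, PySem.Str.len_eq]
      cases enabled with
      | false => simp
      | true =>
        rw [← pyRange_cast]
        exact set_update_disjoint res _ (PySem.List.nodup_pyRange_one _ _)
          (fun x hx hm => by
            have := (PySem.List.mem_pyRange_one.1 hx).1
            have := hres x hm
            omega)
    · rw [if_neg hbr]
      -- common continuation once the chosen event (p, b) is identified
      have key : ∀ (p : Int) (b : Bool),
          (scan : Int) ≤ p → p.toNat < mem.toList.length →
          markerAt mem.toList p.toNat = some b →
          (∀ i, scan ≤ i → i < p.toNat → markerAt mem.toList i = none) →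
          (let r := bLoop mem fuel (p + 1) p b
                (if enabled then PySem.Set.update res (PySem.List.pyRange (cursor : Int) p 1) else res)
           if r.2.1 then PySem.Set.update r.1 (PySem.List.pyRange r.2.2 (PySem.Str.len mem) 1) else r.1)
          = res ++ gseg mem.toList cursor mem.toList.length := by
        intro p b hge hlt hmark hnone
        have h0p : (0 : Int) ≤ p := le_trans (by exact_mod_cast Nat.zero_le scan) hge
        obtain ⟨q, rfl⟩ : ∃ q : Nat, p = (q : Int) := ⟨p.toNat, by omega⟩
        simp only [Int.toNat_natCast] at hlt hmark hnone
        have hsp : scan ≤ q := by exact_mod_cast hge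
        have hconst : ∀ j, cursor ≤ j → j < q → stP mem.toList (j+1) = enabled := by
          intro j h1 h2
          by_cases hjs : j < scan
          · exact hseg j h1 hjs
          · rw [stP_const mem.toList (c := scan) (by omega)
                (fun i hi1 hi2 => hnone i hi1 (by omega)), ← hen]
        have hres' : (if enabled then PySem.Set.update res (PySem.List.pyRange (cursor : Int) (q : Int) 1) else res)
            = res ++ gseg mem.toList cursor q := by
          rw [gseg_const mem.toList enabled (by omega) hconst]
          cases enabled with
          | false => simp
          | true =>
            rw [← pyRange_cast]
            exact set_update_disjoint res _ (PySem.List.nodup_pyRange_one _ _)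
              (fun x hx hm => by
                have := (PySem.List.mem_pyRange_one.1 hx).1
                have := hres x hm
                omega)
        have hen' : b = stP mem.toList (q + 1) := by
          rw [stP_succ, hmark, Option.getD_some]
        have hIH := ih (q + 1) q b (res ++ gseg mem.toList cursor q)
          (by omega) (by omega) (by omega)
          (by
            intro x hx
            rcases List.mem_append.1 hx with hr | hg
            · have := hres x hr
              omega
            · exact (gseg_mem_lt hg).2)
          hen'
          (by
            intro j h1 h2
            rw [show j = q by omega]
            exact hen'.symm)
        rw [hres', show (q : Int) + 1 = ((q + 1 : Nat) : Int) by push_cast; ring]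
        rw [hIH, List.append_assoc, ← gseg_append mem.toList (by omega) (by omega)]
      by_cases hsel : PySem.Str.findFrom mem "don't()" (scan : Int) = -1 ∨
          (¬PySem.Str.findFrom mem "do()" (scan : Int) = -1 ∧
            PySem.Str.findFrom mem "do()" (scan : Int) < PySem.Str.findFrom mem "don't()" (scan : Int))
      · rw [if_pos hsel]
        have hdne : PySem.Str.findFrom mem "do()" (scan : Int) ≠ -1 := by
          rcases hsel with h | h
          · exact fun hd => hbr ⟨hd, h⟩
          · exact h.1
        have hspec := PySem.Chars.findFrom_natCast_spec mem.toList "do()".toList scan hscan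
          (by rw [← PySem.Str.findFrom_eq]; exact hdne)
        simp only [PySem.Str.findFrom_eq] at *
        exact key _ true hspec.1
          (prefix_drop_lt (by decide) hspec.2.1)
          (marker_do hspec.2.1)
          (by
            intro i h1 h2
            apply marker_none (hspec.2.2 i h1 h2)
            intro hpre
            rcases hsel with ht | ⟨_, hdt⟩
            · exact (PySem.Chars.findFrom_natCast_eq_neg_one_iff mem.toList "don't()".toList scan hscan).1 ht
                (prefix_drop_infix mem.toList _ h1 hpre)
            · by_cases ht : PySem.Chars.findFrom mem.toList "don't()".toList (scan : Int) = -1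
              · exact (PySem.Chars.findFrom_natCast_eq_neg_one_iff mem.toList "don't()".toList scan hscan).1 ht
                  (prefix_drop_infix mem.toList _ h1 hpre)
              · have htspec := PySem.Chars.findFrom_natCast_spec mem.toList "don't()".toList scan hscan ht
                exact htspec.2.2 i h1 (by omega) hpre)
      · rw [if_neg hsel]
        push_neg at hsel
        have htne : PySem.Str.findFrom mem "don't()" (scan : Int) ≠ -1 := hsel.1
        have htspec := PySem.Chars.findFrom_natCast_spec mem.toList "don't()".toList scan hscan
          (by rw [← PySem.Str.findFrom_eq]; exact htne)
        simp only [PySem.Str.findFrom_eq] at *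
        exact key _ false htspec.1
          (prefix_drop_lt (by decide) htspec.2.1)
          (marker_dont htspec.2.1)
          (by
            intro i h1 h2
            apply marker_none ?_ (htspec.2.2 i h1 h2)
            intro hpre
            by_cases hd : PySem.Chars.findFrom mem.toList "do()".toList (scan : Int) = -1
            · exact (PySem.Chars.findFrom_natCast_eq_neg_one_iff mem.toList "do()".toList scan hscan).1 hd
                (prefix_drop_infix mem.toList _ h1 hpre)
            · have hdspec := PySem.Chars.findFrom_natCast_spec mem.toList "do()".toList scan hscan hd
              have hts := hsel.2 hd
              exact hdspec.2.2 i h1 (by omega) hpre)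

lemma B_eq_gseg (mem : String) :
    get_enabled_indices_alt mem = gseg mem.toList 0 mem.toList.length := by
  have h := bLoop_spec mem (mem.toList.length + 1) 0 0 true [] (by omega) (by omega) (by omega)
    (by simp) rfl (fun j h1 h2 => absurd h2 (by omega))
  simpa [get_enabled_indices_alt, PySem.Set.empty] using h

-- ===== VERDICT (by name: the statement is the Claim_ definition above) =====
theorem get_enabled_indices_spec : Claim_equal_get_enabled_indices := by
  intro mem _
  show get_enabled_indices mem = get_enabled_indices_alt mem
  rw [A_eq_gseg, B_eq_gseg]
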